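-- pv_equiv track=rewrite | github.com/stevenxxiu/websearch_unimelb | workshops/week03/q6/main.py | cluster_dfs
-- ===== SOURCE A (Python) =====
-- def cluster_dfs(node, clusters):
--     n = len(clusters) + 1
--     dfs_iter_stack = [iter((node,))]
--     while dfs_iter_stack:
--         try:
--             cur_cluster = next(dfs_iter_stack[-1])
--             if cur_cluster>=n:
--                 dfs_iter_stack.append(iter(clusters[cur_cluster-n][:2]))
--             else:
--                 yield cur_cluster
--         except StopIteration:
--             dfs_iter_stack.pop()
-- ===== SOURCE B (Python) =====
-- def cluster_dfs(node, clusters):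
--     n = len(clusters) + 1
--     frontier = [node]
--     while any(x >= n for x in frontier):
--         frontier = [y for x in frontier
--                     for y in ([x] if x < n else clusters[x - n][:2])]
--     yield from frontier
-- ===== Notes on version B (the rewrite author's own statement) =====
-- stated objective: alternative
-- what changed: A's explicit DFS over a stack of live child iterators (next()/StopIteration) is replaced by iterated parallel substitution: keep a frontier list and, while it contains any cluster id, rewrite every element in place (leaf stays, cluster id becomes its first two children), which yields the same left-to-right leaf sequence with no stack, no recursion and no iterator protocol.
import Mathlib
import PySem

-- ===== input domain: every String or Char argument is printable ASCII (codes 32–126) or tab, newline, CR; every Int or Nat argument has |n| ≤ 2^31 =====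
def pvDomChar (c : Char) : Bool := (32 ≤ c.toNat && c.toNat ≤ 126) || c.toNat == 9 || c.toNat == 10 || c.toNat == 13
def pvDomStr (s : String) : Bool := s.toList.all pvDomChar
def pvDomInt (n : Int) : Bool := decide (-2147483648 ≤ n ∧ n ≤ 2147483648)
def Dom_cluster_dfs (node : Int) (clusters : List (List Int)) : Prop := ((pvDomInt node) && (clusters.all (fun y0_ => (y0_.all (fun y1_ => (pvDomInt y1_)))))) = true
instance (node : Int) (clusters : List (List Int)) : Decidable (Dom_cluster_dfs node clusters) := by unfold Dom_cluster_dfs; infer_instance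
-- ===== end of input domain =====

-- B replaces A's iterator-stack DFS by iterated parallel substitution of the frontier list
-- (each cluster id is rewritten to its first two children, round by round), producing the same
-- left-to-right leaf sequence.  Objective: alternative (no stack, no iterator protocol).

-- ===== PORT A =====
-- Transliteration of A's while-loop over a stack of iterators.  An iterator is represented by
-- the list of its remaining elements (top of stack = head of the outer list); `next` on an
-- exhausted iterator (StopIteration) is the `[] :: rest` case.  The loop runs until the stack
-- is empty; the Nat fuel only makes it total (outside Pre_ the Python loop diverges or raises
-- IndexError — there `.getD []` stands for the raising clusters[cur-n]); under Pre_ the fuel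
-- is proven sufficient, so it never shapes the result being claimed.
def goA (clusters : List (List Int)) (n : Int) : Nat → List (List Int) → List Int → List Int
  | 0, _, acc => acc.reverse
  | _ + 1, [], acc => acc.reverse
  | f + 1, [] :: rest, acc => goA clusters n f rest acc
  | f + 1, (cur :: tl) :: rest, acc =>
    if n ≤ cur then
      goA clusters n f
        (PySem.List.slice ((PySem.List.pyGet? clusters (cur - n)).getD []) none (some 2)
          :: tl :: rest) acc
    else
      goA clusters n f (tl :: rest) (cur :: acc)

def cluster_dfs (node : Int) (clusters : List (List Int)) : List Int :=
  goA clusters ((clusters.length : Int) + 1) (4 * 2 ^ (clusters.length + 1) + 4) [[node]] []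

-- ===== PORT B =====
-- Transliteration of Source B: one substitution round of the frontier (the inner comprehension) …
def expandB (clusters : List (List Int)) (n : Int) (xs : List Int) : List Int :=
  xs.flatMap (fun x =>
    if x < n then [x]
    else PySem.List.slice ((PySem.List.pyGet? clusters (x - n)).getD []) none (some 2))

-- … and Source B's while-loop: rewrite while any frontier element is a cluster id.  As in goA the
-- Nat fuel only makes the loop total; under Pre_ it is proven sufficient.
def goB (clusters : List (List Int)) (n : Int) : Nat → List Int → List Int
  | 0, xs => xs
  | f + 1, xs =>
    if xs.any (fun x => decide (n ≤ x)) then goB clusters n f (expandB clusters n xs) else xs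

def cluster_dfs_alt (node : Int) (clusters : List (List Int)) : List Int :=
  goB clusters ((clusters.length : Int) + 1) (clusters.length + 1) [node]

-- ===== PRECONDITION & SPEC =====
-- Cluster-reference graph on indices: i refers to j when clusters[i][:2] contains n + j.
def succsN (clusters : List (List Int)) (i : Nat) : List Nat :=
  ((clusters.getD i []).take 2).filterMap
    (fun c => if ((clusters.length : Int) + 1) ≤ c
              then some (c - ((clusters.length : Int) + 1)).toNat else none)

-- Kleene iteration of the well-founded-part operator of that graph: wfs (k+1) holds the
-- in-range indices all of whose references lie in wfs k (it saturates by round m = length).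
def wfs (clusters : List (List Int)) : Nat → List Nat
  | 0 => []
  | k + 1 => (List.range clusters.length).filter
      (fun i => (succsN clusters i).all (fun j => (wfs clusters k).contains j))

-- Pre_: when node names a cluster at all, its index lies in the well-founded part of the
-- cluster-reference graph — i.e. every reference chain from node stays in range and is finite.
-- This is exactly where the Python A returns: outside it A raises IndexError (a reached
-- out-of-range id) or loops forever (a reachable reference cycle), and B does the same.
def Pre_cluster_dfs (node : Int) (clusters : List (List Int)) : Prop :=
  ((clusters.length : Int) + 1) ≤ node →
    (node - ((clusters.length : Int) + 1)).toNat ∈ wfs clusters (clusters.length + 1)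
instance (node : Int) (clusters : List (List Int)) : Decidable (Pre_cluster_dfs node clusters) := by
  unfold Pre_cluster_dfs; infer_instance

def pvWitness_cluster_dfs : Int × List (List Int) := (4, [[0, 1], [2, 3]])

def Spec_cluster_dfs (node : Int) (clusters : List (List Int)) (out : List Int) : Prop := out = cluster_dfs_alt node clusters
instance (node : Int) (clusters : List (List Int)) (out : List Int) : Decidable (Spec_cluster_dfs node clusters out) := by unfold Spec_cluster_dfs; infer_instance

-- ===== CLAIM (what is proved, stated in full; the proofs are below) =====
def Claim_equal_cluster_dfs : Prop := ∀ (node : Int) (clusters : List (List Int)), Dom_cluster_dfs node clusters → Pre_cluster_dfs node clusters → Spec_cluster_dfs node clusters (cluster_dfs node clusters)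

-- ===== LEMMAS AND PROOFS =====

-- The leaf list below `cur`, recursing to depth d (d larger than cur's wfs rank is enough).
def leavesR (clusters : List (List Int)) (n : Int) : Nat → Int → List Int
  | 0, cur => [cur]
  | d + 1, cur =>
    if n ≤ cur then
      ((clusters.getD (cur - n).toNat []).take 2).flatMap (leavesR clusters n d)
    else [cur]

-- loop-iteration count of goA below `cur` to depth d (an internal node costs 2: push + pop).
def costA (clusters : List (List Int)) (n : Int) : Nat → Int → Nat
  | 0, _ => 1
  | d + 1, cur =>
    if n ≤ cur then
      2 + (((clusters.getD (cur - n).toNat []).take 2).map (costA clusters n d)).sum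
    else 1

theorem mem_wfs_succ (clusters : List (List Int)) (i : Nat) (k : Nat) :
    i ∈ wfs clusters (k + 1) ↔
      i < clusters.length ∧ ∀ j ∈ succsN clusters i, j ∈ wfs clusters k := by
  simp [wfs, List.mem_filter]

theorem mem_succs_of_kid (clusters : List (List Int)) (i : Nat) (c : Int)
    (hc : c ∈ (clusters.getD i []).take 2) (hn : ((clusters.length : Int) + 1) ≤ c) :
    (c - ((clusters.length : Int) + 1)).toNat ∈ succsN clusters i := by
  unfold succsN
  exact List.mem_filterMap.mpr ⟨c, hc, by simp [hn]⟩

theorem slice_two (xs : List Int) : PySem.List.slice xs none (some 2) = xs.take 2 := by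
  simpa using PySem.List.slice_to_natCast xs 2

-- the slice both ports take is the child list, when the index is in range
theorem kids_eq (clusters : List (List Int)) (n cur : Int)
    (h0 : 0 ≤ cur - n) (_h1 : cur - n < (clusters.length : Int)) :
    PySem.List.slice ((PySem.List.pyGet? clusters (cur - n)).getD []) none (some 2)
      = (clusters.getD (cur - n).toNat []).take 2 := by
  rw [slice_two, PySem.List.pyGet?_of_nonneg clusters h0, ← List.getD_eq_getElem?_getD]

-- small-step equations of A's loop
theorem goA_empty (clusters : List (List Int)) (n : Int) (f : Nat) (acc : List Int) :
    goA clusters n f [] acc = acc.reverse := by cases f <;> rfl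

theorem goA_pop (clusters : List (List Int)) (n : Int) (f : Nat)
    (rest : List (List Int)) (acc : List Int) :
    goA clusters n (f + 1) ([] :: rest) acc = goA clusters n f rest acc := rfl

theorem goA_node (clusters : List (List Int)) (n : Int) (f : Nat) (cur : Int)
    (tl : List Int) (rest : List (List Int)) (acc : List Int) (h : n ≤ cur) :
    goA clusters n (f + 1) ((cur :: tl) :: rest) acc
      = goA clusters n f
          (PySem.List.slice ((PySem.List.pyGet? clusters (cur - n)).getD []) none (some 2)
            :: tl :: rest) acc := by
  simp [goA, h]

theorem goA_leaf (clusters : List (List Int)) (n : Int) (f : Nat) (cur : Int)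
    (tl : List Int) (rest : List (List Int)) (acc : List Int) (h : ¬ n ≤ cur) :
    goA clusters n (f + 1) ((cur :: tl) :: rest) acc
      = goA clusters n f (tl :: rest) (cur :: acc) := by
  simp [goA, h]

-- consuming a whole child list on top of A's stack
theorem goA_chain (clusters : List (List Int)) (n : Int) (d : Nat) (ch : List Int)
    (step : ∀ c ∈ ch, ∀ (f : Nat) (tl : List Int) (rest : List (List Int)) (acc : List Int),
      goA clusters n (costA clusters n d c + f) ((c :: tl) :: rest) acc
        = goA clusters n f (tl :: rest) ((leavesR clusters n d c).reverse ++ acc)) :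
    ∀ (f : Nat) (rest : List (List Int)) (acc : List Int),
      goA clusters n ((ch.map (costA clusters n d)).sum + f) (ch :: rest) acc
        = goA clusters n f ([] :: rest) ((ch.flatMap (leavesR clusters n d)).reverse ++ acc) := by
  induction ch with
  | nil => intro f rest acc; simp
  | cons c ch ih =>
    intro f rest acc
    have hs : ((c :: ch).map (costA clusters n d)).sum + f
        = costA clusters n d c + ((ch.map (costA clusters n d)).sum + f) := by
      simp; omega
    rw [hs, step c (by simp), ih (fun c hc => step c (by simp [hc]))]
    simp

-- A's loop, given enough fuel, pops one pending node and appends its leaves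
theorem goA_run : ∀ (d : Nat) (clusters : List (List Int)) (n cur : Int),
    n = (clusters.length : Int) + 1 →
    (n ≤ cur → (cur - n).toNat ∈ wfs clusters d) →
    ∀ (f : Nat) (tl : List Int) (rest : List (List Int)) (acc : List Int),
      goA clusters n (costA clusters n d cur + f) ((cur :: tl) :: rest) acc
        = goA clusters n f (tl :: rest) ((leavesR clusters n d cur).reverse ++ acc) := by
  intro d
  induction d with
  | zero =>
    intro clusters n cur hn hwf f tl rest acc
    have hcur : ¬ n ≤ cur := fun h => by simpa [wfs] using hwf h
    rw [costA, Nat.add_comm 1 f, goA_leaf _ _ _ _ _ _ _ hcur, leavesR]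
    simp
  | succ d ih =>
    intro clusters n cur hn hwf f tl rest acc
    by_cases hcur : n ≤ cur
    · obtain ⟨hi, hsucc⟩ := (mem_wfs_succ clusters _ d).mp (hwf hcur)
      have h0 : (0:Int) ≤ cur - n := by omega
      have hlt : cur - n < (clusters.length : Int) := by omega
      have hkid : ∀ c ∈ (clusters.getD (cur - n).toNat []).take 2,
          n ≤ c → (c - n).toNat ∈ wfs clusters d := by
        intro c hc hcn
        exact hsucc _ (by rw [hn] at hc hcn ⊢; exact mem_succs_of_kid clusters _ c hc hcn)
      have hcost : costA clusters n (d + 1) cur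
          = 2 + (((clusters.getD (cur - n).toNat []).take 2).map (costA clusters n d)).sum := by
        rw [costA, if_pos hcur]
      have hrec : leavesR clusters n (d + 1) cur
          = ((clusters.getD (cur - n).toNat []).take 2).flatMap (leavesR clusters n d) := by
        rw [leavesR, if_pos hcur]
      have hfuel : costA clusters n (d + 1) cur + f
          = ((((clusters.getD (cur - n).toNat []).take 2).map (costA clusters n d)).sum
              + (1 + f)) + 1 := by
        rw [hcost]; omega
      rw [hfuel, goA_node _ _ _ _ _ _ _ hcur, kids_eq clusters n cur h0 hlt,
        goA_chain clusters n d _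
          (fun c hc => ih clusters n c hn (hkid c hc)),
        Nat.add_comm 1 f, goA_pop, ← hrec]
    · rw [costA, if_neg hcur, Nat.add_comm 1 f, goA_leaf _ _ _ _ _ _ _ hcur, leavesR,
        if_neg hcur]
      simp

-- fuel adequacy for A: the iteration count to depth d is at most 4 * 2 ^ d - 2
theorem costA_bound : ∀ (d : Nat) (clusters : List (List Int)) (n cur : Int),
    costA clusters n d cur ≤ 4 * 2 ^ d - 2 := by
  intro d
  induction d with
  | zero => intro clusters n cur; rw [costA]; omega
  | succ d ih =>
    intro clusters n cur
    have hp : 1 ≤ 2 ^ d := Nat.one_le_two_pow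
    by_cases hcur : n ≤ cur
    · have hsum : (((clusters.getD (cur - n).toNat []).take 2).map (costA clusters n d)).sum
          ≤ 2 * (4 * 2 ^ d - 2) := by
        have hb : ∀ x ∈ ((clusters.getD (cur - n).toNat []).take 2).map (costA clusters n d),
            x ≤ 4 * 2 ^ d - 2 := by
          intro x hx
          obtain ⟨c, _, rfl⟩ := List.mem_map.mp hx
          exact ih clusters n c
        calc (((clusters.getD (cur - n).toNat []).take 2).map (costA clusters n d)).sum
            ≤ (((clusters.getD (cur - n).toNat []).take 2).map (costA clusters n d)).length
                • (4 * 2 ^ d - 2) := List.sum_le_card_nsmul _ _ hb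
          _ ≤ 2 * (4 * 2 ^ d - 2) := by
              have : (((clusters.getD (cur - n).toNat []).take 2).map
                  (costA clusters n d)).length ≤ 2 := by
                simp [List.length_take]
              simpa [smul_eq_mul] using Nat.mul_le_mul_right (4 * 2 ^ d - 2) this
      rw [costA, if_pos hcur]
      have h2 : (2:Nat) ^ (d + 1) = 2 * 2 ^ d := by ring
      omega
    · rw [costA, if_neg hcur]
      have : (1:Nat) ≤ 2 ^ (d + 1) := Nat.one_le_two_pow
      omega

-- leaves of a leaf id, at any depth
theorem leavesR_leaf (clusters : List (List Int)) (n cur : Int) (d : Nat) (h : ¬ n ≤ cur) :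
    leavesR clusters n d cur = [cur] := by
  cases d with
  | zero => rfl
  | succ d => rw [leavesR, if_neg h]

-- a frontier with no cluster id is its own leaf list
theorem flatMap_leavesR_of_noInternal (clusters : List (List Int)) (n : Int) (d : Nat)
    (xs : List Int) (h : ∀ x ∈ xs, ¬ n ≤ x) :
    xs.flatMap (leavesR clusters n d) = xs := by
  induction xs with
  | nil => rfl
  | cons x xs ih =>
    rw [List.flatMap_cons, leavesR_leaf clusters n x d (h x (by simp)),
      ih (fun x hx => h x (by simp [hx]))]
    rfl

-- one substitution round peels one depth level off the leaf computation
theorem expandB_leaves (clusters : List (List Int)) (n : Int) (d : Nat) (xs : List Int)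
    (hn : n = (clusters.length : Int) + 1)
    (hOK : ∀ x ∈ xs, n ≤ x → (x - n).toNat ∈ wfs clusters (d + 1)) :
    (expandB clusters n xs).flatMap (leavesR clusters n d)
      = xs.flatMap (leavesR clusters n (d + 1)) := by
  induction xs with
  | nil => rfl
  | cons x xs ih =>
    rw [expandB, List.flatMap_cons, ← expandB, List.flatMap_append, List.flatMap_cons,
      ih (fun x hx => hOK x (by simp [hx]))]
    congr 1
    by_cases hx : x < n
    · rw [if_pos hx, leavesR, if_neg (by omega)]
      simp [leavesR_leaf clusters n x d (by omega)]
    · obtain ⟨hi, _⟩ := (mem_wfs_succ clusters _ d).mp (hOK x (by simp) (by omega))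
      rw [if_neg hx, kids_eq clusters n x (by omega) (by omega), leavesR, if_pos (by omega)]

-- a substitution round lowers every frontier element's wfs level by one
theorem expandB_OK (clusters : List (List Int)) (n : Int) (d : Nat) (xs : List Int)
    (hn : n = (clusters.length : Int) + 1)
    (hOK : ∀ x ∈ xs, n ≤ x → (x - n).toNat ∈ wfs clusters (d + 1)) :
    ∀ y ∈ expandB clusters n xs, n ≤ y → (y - n).toNat ∈ wfs clusters d := by
  intro y hy hny
  obtain ⟨x, hx, hyx⟩ := List.mem_flatMap.mp hy
  by_cases hxl : x < n
  · rw [if_pos hxl] at hyx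
    simp at hyx
    omega
  · rw [if_neg hxl] at hyx
    obtain ⟨hi, hsucc⟩ := (mem_wfs_succ clusters _ d).mp (hOK x hx (by omega))
    rw [kids_eq clusters n x (by omega) (by omega)] at hyx
    exact hsucc _ (by rw [hn] at hyx hny ⊢; exact mem_succs_of_kid clusters _ y hyx hny)

-- B's loop, with fuel at least the start level, computes the leaf list
theorem goB_run : ∀ (d : Nat) (clusters : List (List Int)) (n : Int) (f : Nat) (xs : List Int),
    n = (clusters.length : Int) + 1 → d ≤ f →
    (∀ x ∈ xs, n ≤ x → (x - n).toNat ∈ wfs clusters d) →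
    goB clusters n f xs = xs.flatMap (leavesR clusters n d) := by
  intro d
  induction d with
  | zero =>
    intro clusters n f xs hn _ hOK
    have hno : ∀ x ∈ xs, ¬ n ≤ x := fun x hx h => by simpa [wfs] using hOK x hx h
    have hany : xs.any (fun x => decide (n ≤ x)) = false := by
      simp only [List.any_eq_false, decide_eq_true_eq]
      exact hno
    rw [flatMap_leavesR_of_noInternal clusters n 0 xs hno]
    cases f with
    | zero => rfl
    | succ f => rw [goB, hany]; rfl
  | succ d ih =>
    intro clusters n f xs hn hf hOK
    obtain ⟨f, rfl⟩ : ∃ f', f = f' + 1 := ⟨f - 1, by omega⟩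
    by_cases hany : xs.any (fun x => decide (n ≤ x)) = true
    · rw [goB, hany, if_pos rfl,
        ih clusters n f (expandB clusters n xs) hn (by omega)
          (expandB_OK clusters n d xs hn hOK),
        expandB_leaves clusters n d xs hn hOK]
    · have hno : ∀ x ∈ xs, ¬ n ≤ x := by
        simp only [List.any_eq_true, decide_eq_true_eq, not_exists, not_and] at hany
        exact hany
      have hany' : xs.any (fun x => decide (n ≤ x)) = false := by
        cases h : xs.any (fun x => decide (n ≤ x))
        · rfl
        · exact absurd h hany
      rw [goB, hany', flatMap_leavesR_of_noInternal clusters n (d + 1) xs hno]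
      simp

-- both ports compute the leaf list at the start node
theorem cluster_dfs_eq (node : Int) (clusters : List (List Int))
    (hpre : Pre_cluster_dfs node clusters) :
    cluster_dfs node clusters
      = leavesR clusters ((clusters.length : Int) + 1) (clusters.length + 1) node := by
  have hb := costA_bound (clusters.length + 1) clusters ((clusters.length : Int) + 1) node
  have hp : 1 ≤ 2 ^ (clusters.length + 1) := Nat.one_le_two_pow
  have hf : 4 * 2 ^ (clusters.length + 1) + 4
      = costA clusters ((clusters.length : Int) + 1) (clusters.length + 1) node
        + (((4 * 2 ^ (clusters.length + 1) + 4)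
            - costA clusters ((clusters.length : Int) + 1) (clusters.length + 1) node - 1)
          + 1) := by omega
  unfold cluster_dfs
  rw [hf, goA_run (clusters.length + 1) clusters _ node rfl hpre, goA_pop, goA_empty]
  simp

theorem cluster_dfs_alt_eq (node : Int) (clusters : List (List Int))
    (hpre : Pre_cluster_dfs node clusters) :
    cluster_dfs_alt node clusters
      = leavesR clusters ((clusters.length : Int) + 1) (clusters.length + 1) node := by
  unfold cluster_dfs_alt
  rw [goB_run (clusters.length + 1) clusters _ (clusters.length + 1) [node] rfl le_rfl
    (fun x hx => by simp at hx; subst hx; exact hpre)]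
  simp

-- ===== VERDICT (by name: the statement is the Claim_ definition above) =====
theorem cluster_dfs_spec : Claim_equal_cluster_dfs := by
  intro node clusters _ hpre
  unfold Spec_cluster_dfs
  rw [cluster_dfs_eq node clusters hpre, cluster_dfs_alt_eq node clusters hpre]
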